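-- pv_equiv track=rewrite | github.com/MEDodus/aoc-solutions | python/aoc-test/bfs.py | count_x_bfs
-- ===== SOURCE A (Python) =====
-- def count_x_bfs(board):
--     count = 0
--     visited = set()
--     queue = [(0, 0)]
--     while queue:
--         x, y = queue.pop(0)
--         if x < 0 or y < 0 or x >= len(board) or y >= len(board[0]) or (x, y) in visited:
--             continue
--         elif board[x][y] == "X":
--             count += 1
--         queue.append((x + 1, y))
--         queue.append((x - 1, y))
--         queue.append((x, y + 1))
--         queue.append((x, y - 1))
--         visited.add((x, y))
--     return count
-- ===== SOURCE B (Python) =====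
-- def count_x_bfs(board):
--     # A's BFS floods the whole len(board) x len(board[0]) rectangle from (0,0),
--     # so the result is just the number of "X" cells in that rectangle: scan it directly.
--     return sum(row[:len(board[0])].count("X") for row in board)
-- ===== Notes on version B (the rewrite author's own statement) =====
-- stated objective: faster
-- what changed: Replaced the BFS flood-fill with queue and visited set (which just visits every cell of the rectangle) by a direct scan summing the count of "X" in the first len(board[0]) entries of each row.
import Mathlib
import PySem

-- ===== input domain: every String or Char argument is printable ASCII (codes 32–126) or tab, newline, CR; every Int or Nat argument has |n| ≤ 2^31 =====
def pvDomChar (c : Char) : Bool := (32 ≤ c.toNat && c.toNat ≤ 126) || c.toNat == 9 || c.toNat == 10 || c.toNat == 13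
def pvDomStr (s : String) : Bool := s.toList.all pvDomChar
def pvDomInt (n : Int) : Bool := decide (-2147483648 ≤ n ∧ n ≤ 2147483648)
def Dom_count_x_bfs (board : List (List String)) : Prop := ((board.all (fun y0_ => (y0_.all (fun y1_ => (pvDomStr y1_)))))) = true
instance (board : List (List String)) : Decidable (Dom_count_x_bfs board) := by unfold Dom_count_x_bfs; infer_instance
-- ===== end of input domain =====

-- B replaces A's BFS flood-fill of the whole rectangle by a direct scan of the rows (objective: faster).

-- ===== PORT A =====

-- all cells (x, y) of the rectangle A's BFS floods (used only for the termination measure and the proofs)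
def gridCells (board : List (List String)) : List (Int × Int) :=
  ((List.range board.length).product (List.range (PySem.List.pyGetD board 0 []).length)).map
    (fun p => ((p.1 : Int), (p.2 : Int)))

-- termination helper: adding an unvisited grid cell to `visited` shrinks the unvisited-cell count
theorem filter_add_length {l visited : List (Int × Int)} {q : Int × Int}
    (hn : l.Nodup) (hq : q ∈ l) (hv : PySem.Set.contains visited q = false) :
    ((l.filter (fun c => !(PySem.Set.contains (PySem.Set.add visited q) c))).length) + 1
      = (l.filter (fun c => !(PySem.Set.contains visited c))).length := by
  have hmem : ∀ c : Int × Int, PySem.Set.contains (PySem.Set.add visited q) c = true ↔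
      PySem.Set.contains visited c = true ∨ c = q := by
    intro c
    simp only [PySem.Set.contains, List.contains_iff_mem]
    constructor
    · intro h; rcases (PySem.Set.mem_add visited q c).1 h with h | h
      · exact Or.inl h
      · exact Or.inr h
    · intro h; exact (PySem.Set.mem_add visited q c).2 (by tauto)
  have hfil : l.filter (fun c => !(PySem.Set.contains (PySem.Set.add visited q) c))
      = (l.filter (fun c => !(PySem.Set.contains visited c))).filter (fun c => c != q) := by
    rw [List.filter_filter]
    apply List.filter_congr
    intro c _
    have := hmem c
    by_cases h1 : PySem.Set.contains visited c = true <;> by_cases h2 : c = q <;>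
      simp_all
  have hq' : q ∈ l.filter (fun c => !(PySem.Set.contains visited c)) := by
    simp only [List.mem_filter, hq, true_and, hv, Bool.not_false]
  have hn' : (l.filter (fun c => !(PySem.Set.contains visited c))).Nodup := hn.filter _
  rw [hfil, ← hn'.erase_eq_filter q, List.length_erase_of_mem hq']
  have := List.length_pos_of_mem hq'
  omega

theorem nodup_gridCells (board : List (List String)) : (gridCells board).Nodup := by
  unfold gridCells
  apply List.Nodup.map
  · intro a b h
    simp only [Prod.mk.injEq] at h
    exact Prod.ext (by exact_mod_cast h.1) (by exact_mod_cast h.2)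
  · exact (List.nodup_range).product (List.nodup_range)

theorem mem_gridCells (board : List (List String)) (x y : Int) :
    (x, y) ∈ gridCells board ↔
      0 ≤ x ∧ x < (board.length : Int) ∧ 0 ≤ y ∧ y < ((PySem.List.pyGetD board 0 []).length : Int) := by
  unfold gridCells
  simp only [List.mem_map]
  constructor
  · rintro ⟨⟨i, j⟩, hm, h⟩
    rw [List.pair_mem_product] at hm
    simp only [List.mem_range] at hm
    obtain ⟨rfl, rfl⟩ := Prod.mk.injEq .. ▸ (by exact ⟨congrArg Prod.fst h, congrArg Prod.snd h⟩ : ((i:Int) = x ∧ (j:Int) = y))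
    refine ⟨by positivity, by exact_mod_cast hm.1, by positivity, by exact_mod_cast hm.2⟩
  · rintro ⟨h0, h1, h2, h3⟩
    refine ⟨(x.toNat, y.toNat), ?_, ?_⟩
    · rw [List.pair_mem_product]; simp only [List.mem_range]; omega
    · simp only [Prod.mk.injEq]; omega

-- the BFS loop of A, transliterated: pop the head, skip invalid/visited, count "X", push 4 neighbours
def bfsLoop (board : List (List String)) (count : Int) (visited : PySem.Set (Int × Int))
    (queue : List (Int × Int)) : Int :=
  match queue with
  | [] => count
  | (x, y) :: rest =>
    if h : x < 0 ∨ y < 0 ∨ (board.length : Int) ≤ x ∨ ((PySem.List.pyGetD board 0 []).length : Int) ≤ y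
        ∨ PySem.Set.contains visited (x, y) = true then
      bfsLoop board count visited rest
    else
      bfsLoop board
        (if PySem.List.pyGetD (PySem.List.pyGetD board x []) y "" == "X" then count + 1 else count)
        (PySem.Set.add visited (x, y))
        (rest ++ [(x + 1, y), (x - 1, y), (x, y + 1), (x, y - 1)])
termination_by 4 * ((gridCells board).filter (fun c => !(PySem.Set.contains visited c))).length + queue.length
decreasing_by
  · simp only [List.length_cons]; omega
  · push_neg at h
    obtain ⟨h0, h1, h2, h3, h4⟩ := h
    have hq : (x, y) ∈ gridCells board := (mem_gridCells board x y).2 ⟨h0, by omega, h1, by omega⟩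
    have := filter_add_length (nodup_gridCells board) hq (by simpa using h4)
    simp only [List.length_append, List.length_cons]
    simp only [List.length_nil]
    omega

def count_x_bfs (board : List (List String)) : Int :=
  bfsLoop board 0 PySem.Set.empty [(0, 0)]

-- ===== PORT B =====
def count_x_bfs_alt (board : List (List String)) : Int :=
  (board.map (fun row =>
    (PySem.List.count (PySem.List.slice row none (some (PySem.List.len (PySem.List.pyGetD board 0 [])))) "X" : Int))).sum

-- ===== PRECONDITION & SPEC =====
-- Pre_ excludes exactly the ragged boards with a row shorter than row 0, on which A raises IndexError
-- when the BFS reaches a missing cell (A returns on all other boards, including the empty board).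
def Pre_count_x_bfs (board : List (List String)) : Prop :=
  ∀ row ∈ board, (PySem.List.pyGetD board 0 []).length ≤ row.length
instance (board : List (List String)) : Decidable (Pre_count_x_bfs board) := by
  unfold Pre_count_x_bfs; infer_instance
def pvWitness_count_x_bfs : List (List String) := [["X", "."], [".", "X"]]

def Spec_count_x_bfs (board : List (List String)) (out : Int) : Prop := out = count_x_bfs_alt board
instance (board : List (List String)) (out : Int) : Decidable (Spec_count_x_bfs board out) := by
  unfold Spec_count_x_bfs; infer_instance

-- ===== CLAIM (what is proved, stated in full; the proofs are below) =====
def Claim_equal_count_x_bfs : Prop := ∀ (board : List (List String)), Dom_count_x_bfs board → Pre_count_x_bfs board → Spec_count_x_bfs board (count_x_bfs board)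

-- ===== LEMMAS AND PROOFS =====

-- Bool membership bridge for the Python set
theorem set_contains_iff (s : List (Int × Int)) (c : Int × Int) :
    PySem.Set.contains s c = true ↔ c ∈ s := by
  simp [PySem.Set.contains]

-- the value A adds to `count` at cell c
def xval (board : List (List String)) (c : Int × Int) : Int :=
  if PySem.List.pyGetD (PySem.List.pyGetD board c.1 []) c.2 "" == "X" then 1 else 0

-- grid neighbourhood (the four cells A pushes from v)
def adjc (v c : Int × Int) : Prop :=
  c = (v.1 + 1, v.2) ∨ c = (v.1 - 1, v.2) ∨ c = (v.1, v.2 + 1) ∨ c = (v.1, v.2 - 1)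

-- marking q visited removes exactly q from the unvisited cells
theorem filter_add_erase {l visited : List (Int × Int)} {q : Int × Int}
    (hv : PySem.Set.contains visited q = false) :
    l.filter (fun c => !(PySem.Set.contains (PySem.Set.add visited q) c))
      = (l.filter (fun c => !(PySem.Set.contains visited c))).filter (fun c => c != q) := by
  rw [List.filter_filter]
  apply List.filter_congr
  intro c _
  have hmem : PySem.Set.contains (PySem.Set.add visited q) c = true ↔
      PySem.Set.contains visited c = true ∨ c = q := by
    rw [set_contains_iff, PySem.Set.mem_add, set_contains_iff]
  by_cases h1 : PySem.Set.contains visited c = true <;> by_cases h2 : c = q <;> simp_all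

-- the unvisited X-sum loses exactly xval q when q is marked visited
theorem sum_filter_add {l visited : List (Int × Int)} {q : Int × Int} (f : Int × Int → Int)
    (hn : l.Nodup) (hq : q ∈ l) (hv : PySem.Set.contains visited q = false) :
    ((l.filter (fun c => !(PySem.Set.contains visited c))).map f).sum
      = f q + ((l.filter (fun c => !(PySem.Set.contains (PySem.Set.add visited q) c))).map f).sum := by
  rw [filter_add_erase hv]
  have hq' : q ∈ l.filter (fun c => !(PySem.Set.contains visited c)) := by
    simp only [List.mem_filter, hq, true_and, hv, Bool.not_false]
  have hn' : (l.filter (fun c => !(PySem.Set.contains visited c))).Nodup := hn.filter _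
  rw [← hn'.erase_eq_filter q]
  have hperm := (List.perm_cons_erase hq').map f
  rw [hperm.sum_eq, List.map_cons, List.sum_cons]

-- a set of cells containing (0,0) and closed under grid adjacency contains every grid cell
theorem visited_closed (board : List (List String)) (visited : List (Int × Int))
    (h00 : (0, 0) ∈ gridCells board → (0, 0) ∈ visited)
    (hcl : ∀ c ∈ gridCells board, (∃ v ∈ visited, adjc v c) → c ∈ visited) :
    ∀ c ∈ gridCells board, c ∈ visited := by
  rintro ⟨x, y⟩ hc
  rw [mem_gridCells] at hc
  obtain ⟨hx0, hxR, hy0, hyC⟩ := hc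
  have hR : 0 < board.length := by omega
  have hC : 0 < (PySem.List.pyGetD board 0 []).length := by omega
  have col : ∀ i : Nat, i < board.length → ((i : Int), 0) ∈ visited := by
    intro i
    induction i with
    | zero =>
      intro _
      exact h00 ((mem_gridCells board 0 0).2
        ⟨le_refl 0, by exact_mod_cast hR, le_refl 0, by exact_mod_cast hC⟩)
    | succ i ih =>
      intro h
      refine hcl _ ((mem_gridCells board _ 0).2
        ⟨by positivity, by exact_mod_cast h, le_refl 0, by exact_mod_cast hC⟩)
        ⟨((i : Int), 0), ih (by omega), ?_⟩
      left
      simp only [Prod.mk.injEq]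
      exact ⟨by push_cast; ring, trivial⟩
  have row : ∀ i : Nat, i < board.length → ∀ j : Nat,
      j < (PySem.List.pyGetD board 0 []).length → ((i : Int), (j : Int)) ∈ visited := by
    intro i hi j
    induction j with
    | zero => intro _; exact_mod_cast col i hi
    | succ j ih =>
      intro h
      refine hcl _ ((mem_gridCells board _ _).2
        ⟨by positivity, by exact_mod_cast hi, by positivity, by exact_mod_cast h⟩)
        ⟨((i : Int), (j : Int)), ih (by omega), ?_⟩
      right; right; left
      simp only [Prod.mk.injEq]
      exact ⟨trivial, by push_cast; ring⟩
  have hfin := row x.toNat (by omega) y.toNat (by omega)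
  have hx : ((x.toNat : Nat) : Int) = x := by omega
  have hy : ((y.toNat : Nat) : Int) = y := by omega
  rwa [hx, hy] at hfin

-- BFS loop invariant: the loop adds to `count` the X-sum of the still-unvisited grid cells
theorem bfs_invariant (board : List (List String)) (count : Int)
    (visited : PySem.Set (Int × Int)) (queue : List (Int × Int))
    (hnd : visited.Nodup)
    (hsub : ∀ c ∈ visited, c ∈ gridCells board)
    (hfr : ∀ c ∈ gridCells board, c ∉ visited → (∃ v ∈ visited, adjc v c) → c ∈ queue)
    (h00 : (0, 0) ∈ gridCells board → ((0, 0) ∈ visited ∨ (0, 0) ∈ queue)) :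
    bfsLoop board count visited queue
      = count + (((gridCells board).filter
          (fun c => !(PySem.Set.contains visited c))).map (xval board)).sum := by
  revert hnd hsub hfr h00
  induction count, visited, queue using bfsLoop.induct board with
  | case1 count visited =>
    intro hnd hsub hfr h00
    have hall : ∀ c ∈ gridCells board, c ∈ visited := by
      apply visited_closed
      · intro hg
        rcases h00 hg with h | h
        · exact h
        · simp at h
      · intro c hc hadj
        by_contra hcv
        simpa using hfr c hc hcv hadj
    have hnil : (gridCells board).filter (fun c => !(PySem.Set.contains visited c)) = [] := by
      rw [List.filter_eq_nil_iff]
      intro c hc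
      simp [hall c hc]
    rw [bfsLoop, hnil]
    simp
  | case2 count visited x y rest h ih =>
    intro hnd hsub hfr h00
    rw [bfsLoop]
    simp only [dif_pos h]
    apply ih
    · exact hnd
    · exact hsub
    · intro c hc hcv hadj
      have hmem := hfr c hc hcv hadj
      rcases List.mem_cons.1 hmem with rfl | hmem
      · exfalso
        rw [mem_gridCells] at hc
        rcases h with h | h | h | h | h
        · omega
        · omega
        · omega
        · omega
        · exact hcv ((set_contains_iff _ _).1 h)
      · exact hmem
    · intro hg
      rcases h00 hg with hv | hq
      · exact Or.inl hv
      · rcases List.mem_cons.1 hq with he | hq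
        · rw [mem_gridCells] at hg
          injection he with hx hy
          subst hx
          subst hy
          rcases h with h | h | h | h | h
          · exact absurd h (by omega)
          · exact absurd h (by omega)
          · exact absurd h (by omega)
          · exact absurd h (by omega)
          · exact Or.inl ((set_contains_iff _ _).1 h)
        · exact Or.inr hq
  | case3 count visited x y rest h ih =>
    intro hnd hsub hfr h00
    have hx0 : (0:Int) ≤ x := by by_contra hc; exact h (Or.inl (by omega))
    have hy0 : (0:Int) ≤ y := by by_contra hc; exact h (Or.inr (Or.inl (by omega)))
    have hxR : x < (board.length : Int) := by
      by_contra hc; exact h (Or.inr (Or.inr (Or.inl (by omega))))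
    have hyC : y < ((PySem.List.pyGetD board 0 []).length : Int) := by
      by_contra hc; exact h (Or.inr (Or.inr (Or.inr (Or.inl (by omega)))))
    have hcont : PySem.Set.contains visited (x, y) = false := by
      by_contra hc
      exact h (Or.inr (Or.inr (Or.inr (Or.inr (by simpa using hc)))))
    have hq : (x, y) ∈ gridCells board := (mem_gridCells board x y).2 ⟨hx0, hxR, hy0, hyC⟩
    have hqv : (x, y) ∉ visited := by
      intro hm
      rw [← set_contains_iff, hcont] at hm
      exact Bool.false_ne_true hm
    have hadd : PySem.Set.add visited (x, y) = visited ++ [(x, y)] := by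
      simp only [PySem.Set.add, hcont]
      simp
    rw [bfsLoop]
    simp only [dif_neg h]
    simp only [dite_eq_ite] at ih
    rw [ih ?_ ?_ ?_ ?_]
    · rw [sum_filter_add (xval board) (nodup_gridCells board) hq hcont]
      have hxv : xval board (x, y)
          = if PySem.List.pyGetD (PySem.List.pyGetD board x []) y "" == "X" then (1:Int) else 0 := rfl
      rw [hxv]
      split_ifs <;> ring
    · rw [hadd]
      apply hnd.append (List.nodup_singleton _)
      intro c hc hc'
      rw [List.mem_singleton] at hc'
      subst hc'
      exact hqv hc
    · intro c hc
      rcases (PySem.Set.mem_add visited (x, y) c).1 hc with hc | rfl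
      · exact hsub c hc
      · exact hq
    · intro c hc hcv hadj
      have hcv' : c ∉ visited ∧ c ≠ (x, y) := by
        constructor
        · intro hm; exact hcv ((PySem.Set.mem_add visited (x, y) c).2 (Or.inl hm))
        · intro hm; exact hcv ((PySem.Set.mem_add visited (x, y) c).2 (Or.inr hm))
      rcases hadj with ⟨v, hv, hav⟩
      rcases (PySem.Set.mem_add visited (x, y) v).1 hv with hv | rfl
      · have hmm := hfr c hc hcv'.1 ⟨v, hv, hav⟩
        rcases List.mem_cons.1 hmm with rfl | hm
        · exact absurd rfl hcv'.2
        · exact List.mem_append_left _ hm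
      · apply List.mem_append_right
        rcases hav with rfl | rfl | rfl | rfl <;> simp
    · intro hg
      rcases h00 hg with hv | hq'
      · exact Or.inl ((PySem.Set.mem_add visited (x, y) _).2 (Or.inl hv))
      · rcases List.mem_cons.1 hq' with he | hm
        · exact Or.inl ((PySem.Set.mem_add visited (x, y) _).2 (Or.inr he))
        · exact Or.inr (List.mem_append_left _ hm)



-- indexing a list by range(len(l)) is mapping over it
theorem range_map_getD {α β : Type} (l : List α) (d : α) (f : α → β) :
    (List.range l.length).map (fun i => f (l.getD i d)) = l.map f := by
  induction l with
  | nil => rfl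
  | cons a t ih =>
    rw [List.length_cons, List.range_succ_eq_map, List.map_cons, List.map_map]
    simp only [Function.comp_def, Nat.succ_eq_add_one, List.getD_cons_zero, List.getD_cons_succ]
    rw [ih, List.map_cons]

-- one row's contribution: the indicator sum over the first C columns is the count of "X" there
theorem row_sum (row : List String) :
    ∀ C : Nat, C ≤ row.length →
    ((List.range C).map
        (fun (j : Nat) => if PySem.List.pyGetD row (j : Int) "" == "X" then (1:Int) else 0)).sum
      = ((row.take C).count "X" : Int) := by
  intro C
  induction C with
  | zero => intro _; simp
  | succ C ih =>
    intro h
    have hC : C < row.length := by omega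
    have h1 : row[C]? = some row[C] := List.getElem?_eq_getElem hC
    have h2 : PySem.List.pyGetD row (C : Int) "" = row[C] := by
      simp [PySem.List.pyGetD_natCast, List.getD_eq_getElem?_getD, h1]
    rw [List.range_succ, List.map_append, List.sum_append, ih (by omega),
      List.take_add_one, List.count_append, h1]
    simp only [List.map_cons, List.map_nil, List.sum_cons, List.sum_nil, Option.toList_some, h2]
    rcases eq_or_ne (row[C]) "X" with he | he <;> simp [he]

-- summing over the product grid row by row
theorem sum_map_product (R C : Nat) (f : Nat → Nat → Int) :
    (((List.range R).product (List.range C)).map (fun p => f p.1 p.2)).sum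
      = ((List.range R).map (fun i => ((List.range C).map (f i)).sum)).sum := by
  simp [List.product, List.flatMap, List.sum_flatten, List.map_map, Function.comp_def]

-- the X-sum over the whole rectangle equals B's row-by-row scan
theorem grid_sum (board : List (List String)) (hpre : Pre_count_x_bfs board) :
    ((gridCells board).map (xval board)).sum = count_x_bfs_alt board := by
  unfold count_x_bfs_alt gridCells
  rw [List.map_map]
  have hstep : ((List.range board.length).product
        (List.range (PySem.List.pyGetD board 0 []).length)).map
        (xval board ∘ fun p => ((p.1 : Int), (p.2 : Int)))
      = ((List.range board.length).product
        (List.range (PySem.List.pyGetD board 0 []).length)).map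
        (fun p => xval board ((p.1 : Int), (p.2 : Int))) := rfl
  rw [hstep, sum_map_product board.length (PySem.List.pyGetD board 0 []).length
    (fun i j => xval board ((i : Int), (j : Int)))]
  have hrow : ∀ i ∈ List.range board.length,
      ((List.range (PySem.List.pyGetD board 0 []).length).map
        (fun (j : Nat) => xval board ((i : Int), (j : Int)))).sum
      = (((board.getD i []).take (PySem.List.pyGetD board 0 []).length).count "X" : Int) := by
    intro i hi
    rw [List.mem_range] at hi
    have hmem : board.getD i [] ∈ board := by
      rw [List.getD_eq_getElem _ _ hi]
      exact List.getElem_mem hi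
    have hcell : ∀ j : Nat, xval board ((i : Int), (j : Int))
        = if PySem.List.pyGetD (board.getD i []) (j : Int) "" == "X" then (1:Int) else 0 := by
      intro j
      simp only [xval, PySem.List.pyGetD_natCast]
    rw [List.map_congr_left (fun j _ => hcell j)]
    exact row_sum (board.getD i []) _ (hpre _ hmem)
  rw [List.map_congr_left hrow, range_map_getD board []
    (fun row => ((row.take (PySem.List.pyGetD board 0 []).length).count "X" : Int))]
  apply congrArg
  apply List.map_congr_left
  intro row _
  rw [show PySem.List.len (PySem.List.pyGetD board 0 [])
      = (((PySem.List.pyGetD board 0 []).length : Nat) : Int) from by simp [pysem],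
    PySem.List.slice_to_natCast, PySem.List.count_eq]

-- ===== VERDICT (by name: the statement is the Claim_ definition above) =====
theorem count_x_bfs_spec : Claim_equal_count_x_bfs := by
  intro board hdom hpre
  unfold Spec_count_x_bfs count_x_bfs
  have h1 : (PySem.Set.empty : PySem.Set (Int × Int)).Nodup := List.nodup_nil
  have h2 : ∀ c ∈ (PySem.Set.empty : PySem.Set (Int × Int)), c ∈ gridCells board := by
    intro c hc
    simp [PySem.Set.empty] at hc
  have h3 : ∀ c ∈ gridCells board, c ∉ (PySem.Set.empty : PySem.Set (Int × Int)) →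
      (∃ v ∈ (PySem.Set.empty : PySem.Set (Int × Int)), adjc v c) → c ∈ [((0:Int), (0:Int))] := by
    rintro c _ _ ⟨v, hv, _⟩
    simp [PySem.Set.empty] at hv
  have h4 : (0, 0) ∈ gridCells board →
      ((0, 0) ∈ (PySem.Set.empty : PySem.Set (Int × Int)) ∨ (0, 0) ∈ [((0:Int), (0:Int))]) :=
    fun _ => Or.inr (by simp)
  rw [bfs_invariant board 0 PySem.Set.empty [((0:Int), (0:Int))] h1 h2 h3 h4]
  have hfil : (gridCells board).filter (fun c => !(PySem.Set.contains PySem.Set.empty c))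
      = gridCells board := by
    apply List.filter_eq_self.2
    intro c _
    simp [PySem.Set.empty, PySem.Set.contains]
  rw [hfil, grid_sum board hpre]
  ring
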